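-- pv_equiv track=rewrite | github.com/glassus/aoc2023 | day18/code.py | compte
-- ===== SOURCE A (Python) =====
-- def compte(line):
--     i = 0
--     n = 0
--     inside = False
--     while i < len(line):
--         v = 0
--         while i < len(line) and line[i] == '.':
--             i += 1
--             if inside:
--                 v += 1
--         if i < len(line):
--             n += v
--         inside = not inside
--         while i < len(line) and line[i] == '#':
--             i += 1
--             #n += 1
--     return n
-- ===== SOURCE B (Python) =====
-- def compte(line):
--     n = 0
--     pending = 0
--     inside = False
--     prev_hash = False
--     for c in line:
--         if c == '#':
--             n += pending
--             pending = 0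
--             if not prev_hash:
--                 inside = not inside
--             prev_hash = True
--         else:
--             prev_hash = False
--             if c == '.' and inside:
--                 pending += 1
--     return n
-- ===== Notes on version B (the rewrite author's own statement) =====
-- stated objective: simpler
-- what changed: Replaced A's nested run-skipping while-loops and index bookkeeping with a single flat for-loop over the characters that keeps a pending-dot counter (flushed into n when a '#' arrives, so trailing dots are never counted) and flips inside at each new '#'-run start; Pre_ excludes lines containing characters other than '.' and '#', on which A loops forever.
import Mathlib
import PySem

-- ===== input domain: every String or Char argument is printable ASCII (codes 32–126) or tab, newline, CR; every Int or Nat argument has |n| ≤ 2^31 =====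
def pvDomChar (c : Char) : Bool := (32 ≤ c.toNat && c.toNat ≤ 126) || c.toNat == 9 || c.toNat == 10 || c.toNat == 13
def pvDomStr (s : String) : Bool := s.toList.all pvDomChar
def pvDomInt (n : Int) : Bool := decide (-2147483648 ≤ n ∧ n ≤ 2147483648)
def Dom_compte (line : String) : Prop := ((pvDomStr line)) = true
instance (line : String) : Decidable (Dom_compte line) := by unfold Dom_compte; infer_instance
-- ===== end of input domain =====

-- B replaces A's nested run-skipping while-loops with one flat pass keeping a pending-dot
-- counter flushed on '#' (objective: simpler). Pre_ excludes lines with characters other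
-- than '.' and '#', on which A never terminates.

-- ===== PORT A =====
-- A's inner dot loop: consumes '.' chars, incrementing v when inside.
def pvDotLoop : List Char → Bool → Int → List Char × Int
  | c :: cs, inside, v =>
    if c = '.' then pvDotLoop cs inside (if inside then v + 1 else v) else (c :: cs, v)
  | [], _, v => ([], v)

-- A's inner hash loop: consumes '#' chars.
def pvHashLoop : List Char → List Char
  | c :: cs => if c = '#' then pvHashLoop cs else c :: cs
  | [] => []

-- A's outer while loop; fuel only guards totality (A diverges on characters other than
-- '.'/'#'; inside Pre_ each outer iteration consumes ≥ 1 char, so length+1 fuel suffices).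
def pvOuter : Nat → List Char → Int → Bool → Int
  | 0, _, n, _ => n
  | fuel + 1, cs, n, inside =>
    if cs = [] then n
    else
      let p := pvDotLoop cs inside 0
      let n' := if p.1 ≠ [] then n + p.2 else n
      pvOuter fuel (pvHashLoop p.1) n' (!inside)

def compte (line : String) : Int := pvOuter (line.toList.length + 1) line.toList 0 false

-- ===== PORT B =====
-- one flat pass with state (n, pending, inside, prevHash)
def pvScanB : List Char → Int → Int → Bool → Bool → Int
  | [], n, _, _, _ => n
  | c :: cs, n, pending, inside, prevHash =>
    if c = '#' then
      pvScanB cs (n + pending) 0 (if prevHash then inside else !inside) true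
    else
      pvScanB cs n (if c = '.' ∧ inside then pending + 1 else pending) inside false

def compte_alt (line : String) : Int := pvScanB line.toList 0 0 false false

-- ===== PRECONDITION & SPEC =====
-- Pre_ excludes exactly the lines containing a character other than '.' or '#':
-- on those A's outer loop makes no progress and the Python A never returns.
def Pre_compte (line : String) : Prop := (line.toList.all (fun c => c == '.' || c == '#')) = true
instance (line : String) : Decidable (Pre_compte line) := by unfold Pre_compte; infer_instance

def pvWitness_compte : String := ".#."

def Spec_compte (line : String) (out : Int) : Prop := out = compte_alt line
instance (line : String) (out : Int) : Decidable (Spec_compte line out) := by unfold Spec_compte; infer_instance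

-- ===== CLAIM (what is proved, stated in full; the proofs are below) =====
def Claim_equal_compte : Prop := ∀ (line : String), Dom_compte line → Pre_compte line → Spec_compte line (compte line)

-- ===== LEMMAS AND PROOFS =====

-- dotLoop result: shorter, made of chars of cs, head not '.'
theorem pvDotLoop_props (cs : List Char) (i : Bool) (v : Int) :
    (pvDotLoop cs i v).1.length ≤ cs.length ∧
    (∀ c ∈ (pvDotLoop cs i v).1, c ∈ cs) ∧
    (∀ c cs', (pvDotLoop cs i v).1 = c :: cs' → c ≠ '.') := by
  induction cs generalizing v with
  | nil => simp [pvDotLoop]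
  | cons c cs ih =>
    by_cases h : c = '.'
    · rw [show pvDotLoop (c :: cs) i v = pvDotLoop cs i (if i then v + 1 else v) from by
          simp [pvDotLoop, h]]
      obtain ⟨h1, h2, h3⟩ := ih (v := if i then v + 1 else v)
      exact ⟨h1.trans (by simp), fun a ha => List.mem_cons_of_mem _ (h2 a ha), h3⟩
    · simp [pvDotLoop, h]

theorem pvHashLoop_props (cs : List Char) :
    (pvHashLoop cs).length ≤ cs.length ∧ (∀ c ∈ pvHashLoop cs, c ∈ cs) := by
  induction cs with
  | nil => simp [pvHashLoop]
  | cons c cs ih =>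
    by_cases h : c = '#'
    · simp [pvHashLoop, h]
      exact ⟨ih.1.trans (by omega), fun a ha => Or.inr (ih.2 a ha)⟩
    · simp [pvHashLoop, h]

-- running B's scan across a dot run = running A's dot loop on the pending counter
theorem pvScanB_dot (cs : List Char) (i : Bool) (n p : Int) :
    pvScanB cs n p i false
      = pvScanB (pvDotLoop cs i p).1 n (pvDotLoop cs i p).2 i false := by
  induction cs generalizing p with
  | nil => simp [pvDotLoop]
  | cons c cs ih =>
    by_cases h : c = '.'
    · cases i <;> simp [pvScanB, pvDotLoop, h, ih]
    · simp [pvDotLoop, h]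

-- running B's scan across a hash run with prevHash = true: no more toggles, state reset
theorem pvScanB_hash (cs : List Char) (i : Bool) (n : Int) :
    pvScanB cs n 0 i true = pvScanB (pvHashLoop cs) n 0 i false := by
  induction cs with
  | nil => simp [pvScanB, pvHashLoop]
  | cons c cs ih =>
    by_cases h : c = '#'
    · simpa [pvScanB, pvHashLoop, h] using ih
    · simp [pvScanB, pvHashLoop, h]

-- main invariant: A's outer loop agrees with B's flat scan on valid char lists
theorem pvOuter_eq_scan (fuel : Nat) :
    ∀ cs : List Char, (∀ c ∈ cs, c = '.' ∨ c = '#') → cs.length + 1 ≤ fuel →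
    ∀ (n : Int) (i : Bool), pvOuter fuel cs n i = pvScanB cs n 0 i false := by
  induction fuel with
  | zero => intro cs _ hf; omega
  | succ fuel ih =>
    intro cs hvalid hf n i
    rcases heq : cs with _ | ⟨c, cs0⟩
    · simp [pvOuter, pvScanB]
    · subst heq
      have hne : (c :: cs0) ≠ [] := by simp
      rw [pvOuter]
      simp only [hne, if_false]
      obtain ⟨hlen, hmem, hhead⟩ := pvDotLoop_props (c :: cs0) i 0
      have hdot := pvScanB_dot (c :: cs0) i n 0
      rcases hcs' : (pvDotLoop (c :: cs0) i 0).1 with _ | ⟨d, rest⟩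
      · -- all dots consumed: n unchanged, remaining list empty
        simp [pvHashLoop]
        rw [hdot, hcs']
        rcases fuel with _ | fuel <;> simp [pvOuter, pvScanB]
      · -- next char is a '#' run
        have hd : d = '#' := by
          have hd' : d ≠ '.' := hhead d rest hcs'
          have : d = '.' ∨ d = '#' := hvalid d (hmem d (by simp [hcs']))
          tauto
        have hrest_valid : ∀ a ∈ pvHashLoop rest, a = '.' ∨ a = '#' := by
          intro a ha
          exact hvalid a (hmem a (by simp [hcs', (pvHashLoop_props rest).2 a ha]))
        have hlen' : (pvHashLoop rest).length + 1 ≤ fuel := by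
          have h1 := (pvHashLoop_props rest).1
          have h2 : (d :: rest).length ≤ (c :: cs0).length := by rw [← hcs']; exact hlen
          simp at h2 hf ⊢
          omega
        subst hd
        rw [show pvHashLoop ('#' :: rest) = pvHashLoop rest from by simp [pvHashLoop]]
        rw [if_pos (by simp : ('#' :: rest : List Char) ≠ [])]
        rw [ih (pvHashLoop rest) hrest_valid hlen' (n + (pvDotLoop (c :: cs0) i 0).2) (!i)]
        rw [hdot, hcs']
        rw [show pvScanB ('#' :: rest) n (pvDotLoop (c :: cs0) i 0).2 i false
              = pvScanB rest (n + (pvDotLoop (c :: cs0) i 0).2) 0 (!i) true from by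
            simp [pvScanB]]
        exact (pvScanB_hash rest (!i) (n + (pvDotLoop (c :: cs0) i 0).2)).symm

-- ===== VERDICT (by name: the statement is the Claim_ definition above) =====
theorem compte_spec : Claim_equal_compte := by
  intro line _ hpre
  unfold Spec_compte compte compte_alt
  have hvalid : ∀ c ∈ line.toList, c = '.' ∨ c = '#' := by
    intro c hc
    have := List.all_eq_true.mp hpre c hc
    simpa using this
  exact pvOuter_eq_scan (line.toList.length + 1) line.toList hvalid (by omega) 0 false
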